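-- pv_equiv track=rewrite | github.com/ashish-codebase/LinguisticsAssignment1 | HW1-P2.py | find_initial_cm_matrix
-- ===== SOURCE A (Python) =====
-- def find_initial_cm_matrix(mutations_set):
--     inital_common_mutation_matrix = [[None for _ in range(len(mutations_set))] for _ in range(len(mutations_set))]
--
--     for row_index, row in enumerate(inital_common_mutation_matrix):
--         for column_index, column in enumerate(inital_common_mutation_matrix):
--             if row_index == column_index:
--                 inital_common_mutation_matrix[row_index][column_index] = mutations_set[row_index]
--
--     for row_index, row in enumerate(inital_common_mutation_matrix):
--         for column_index, column in enumerate(row):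
--             if row_index > column_index:
--                 inital_common_mutation_matrix[row_index][column_index] = None
--                 continue
--             inital_common_mutation_matrix[row_index][column_index] = find_dictionaries_common_items(inital_common_mutation_matrix[row_index][row_index], inital_common_mutation_matrix[column_index][column_index])
--
--     return inital_common_mutation_matrix
--
-- def find_dictionaries_common_items(dict1, dict2):
--     if dict1 == None or dict2 == None:
--         return None
--     if len(dict1) == 0 or len(dict2) == 0:
--         return []
--     common_dicts = [d1 for d1 in dict1 for d2 in dict2 if d1 == d2]
--     return common_dicts
-- ===== SOURCE B (Python) =====
-- def find_initial_cm_matrix(mutations_set):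
--     # Recursive decomposition: the matrix of head::tail is the head's row
--     # (diagonal cell, then common items of the diagonal with each later list)
--     # followed by the tail's matrix with a None prepended to every row.
--     def common(a, b):
--         return [x for x in a for y in b if x == y]
--
--     def go(lists):
--         if not lists:
--             return []
--         head, tail = lists[0], lists[1:]
--         diag = common(head, head)
--         first_row = [diag] + [common(diag, t) for t in tail]
--         return [first_row] + [[None] + row for row in go(tail)]
--
--     return go(mutations_set)
-- ===== Notes on version B (the rewrite author's own statement) =====
-- stated objective: simpler
-- what changed: Replaces A's two staged index-loop passes over a mutable n×n scratch matrix by a structural recursion that peels off the head list, builds its row directly, and prepends None to every row of the recursively built sub-matrix.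
import Mathlib
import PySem

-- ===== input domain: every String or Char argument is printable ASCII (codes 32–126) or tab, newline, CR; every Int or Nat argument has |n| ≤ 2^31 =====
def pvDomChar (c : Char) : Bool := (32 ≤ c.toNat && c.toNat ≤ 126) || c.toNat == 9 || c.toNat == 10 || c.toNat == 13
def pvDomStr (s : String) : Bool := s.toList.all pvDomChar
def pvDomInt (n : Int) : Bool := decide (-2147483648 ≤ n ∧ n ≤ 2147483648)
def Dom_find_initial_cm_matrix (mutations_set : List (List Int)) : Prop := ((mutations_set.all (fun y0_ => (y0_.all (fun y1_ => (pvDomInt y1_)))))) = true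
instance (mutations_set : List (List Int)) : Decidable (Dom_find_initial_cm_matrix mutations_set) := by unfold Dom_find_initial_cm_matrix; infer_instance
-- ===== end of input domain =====

-- B replaces A's two index-loop passes over a mutable n×n scratch matrix by a structural
-- recursion on the list of mutation sets (objective: simpler — no scratch matrix, no indices).

-- ===== PORT A =====
-- helper find_dictionaries_common_items; on List Int inputs the arguments are 'some'/'none' cells
def pyCommonItems (dict1 dict2 : Option (List Int)) : Option (List Int) :=
  match dict1, dict2 with
  | none, _ => none
  | some _, none => none
  | some l1, some l2 =>
    if l1.length = 0 ∨ l2.length = 0 then some []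
    else some (l1.flatMap fun d1 => l2.filterMap fun d2 => if d1 = d2 then some d1 else none)

-- matrix[i][j] read / in-place write (Python indexed assignment)
def mgetCell (m : List (List (Option (List Int)))) (i j : Nat) : Option (List Int) :=
  (m.getD i []).getD j none

def msetCell (m : List (List (Option (List Int)))) (i j : Nat) (v : Option (List Int)) :
    List (List (Option (List Int))) :=
  m.modify i (fun row => row.set j v)

def find_initial_cm_matrix (mutations_set : List (List Int)) : List (List (Option (List Int))) :=
  let n := mutations_set.length
  let m0 : List (List (Option (List Int))) := List.replicate n (List.replicate n none)
  let m1 := (List.range n).foldl (fun m i =>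
      (List.range n).foldl (fun m j =>
        if i = j then msetCell m i j (some (mutations_set.getD i [])) else m) m) m0
  (List.range n).foldl (fun m i =>
      (List.range n).foldl (fun m j =>
        if j < i then msetCell m i j none
        else msetCell m i j (pyCommonItems (mgetCell m i i) (mgetCell m j j))) m) m1

-- ===== PORT B =====
-- common(a, b) = [x for x in a for y in b if x == y]
def commonB (a b : List Int) : List Int :=
  a.flatMap fun x => b.filterMap fun y => if x = y then some x else none

-- go(lists): head's row, then the sub-matrix of the tail with None prepended to each row
def goB : List (List Int) → List (List (Option (List Int)))
  | [] => []
  | head :: tail =>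
    let diag := commonB head head
    (some diag :: tail.map (fun t => some (commonB diag t))) ::
      (goB tail).map (fun row => none :: row)

def find_initial_cm_matrix_alt (mutations_set : List (List Int)) : List (List (Option (List Int))) :=
  goB mutations_set

-- ===== PRECONDITION & SPEC =====
def Spec_find_initial_cm_matrix (mutations_set : List (List Int)) (out : List (List (Option (List Int)))) : Prop := out = find_initial_cm_matrix_alt mutations_set
instance (mutations_set : List (List Int)) (out : List (List (Option (List Int)))) : Decidable (Spec_find_initial_cm_matrix mutations_set out) := by unfold Spec_find_initial_cm_matrix; infer_instance

-- ===== CLAIM (what is proved, stated in full; the proofs are below) =====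
def Claim_equal_find_initial_cm_matrix : Prop := ∀ (mutations_set : List (List Int)), Dom_find_initial_cm_matrix mutations_set → Spec_find_initial_cm_matrix mutations_set (find_initial_cm_matrix mutations_set)

-- ===== LEMMAS AND PROOFS =====

-- the common closed form both programs compute
def commonM (l t : List Int) : List Int := l.flatMap fun k => List.replicate (t.count k) k

def cellM (s : List (List Int)) (i j : Nat) : Option (List Int) :=
  if j < i then none
  else if j = i then some (commonM (s.getD i []) (s.getD i []))
  else some (commonM (commonM (s.getD i []) (s.getD i [])) (s.getD j []))

def finalRowM (s : List (List Int)) (i : Nat) : List (Option (List Int)) :=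
  (List.range s.length).map (cellM s i)

def initRowM (s : List (List Int)) (r : Nat) : List (Option (List Int)) :=
  (List.range s.length).map (fun c => if c = r then some (s.getD r []) else none)

def rowStM (s : List (List Int)) (i j : Nat) : List (Option (List Int)) :=
  (List.range s.length).map
    (fun c => if c < j then cellM s i c else if c = i then some (s.getD i []) else none)

def stMatM (s : List (List Int)) (i j : Nat) : List (List (Option (List Int))) :=
  (List.range s.length).map
    (fun r => if r < i then finalRowM s r else if r = i then rowStM s i j else initRowM s r)

def outStM (s : List (List Int)) (i : Nat) : List (List (Option (List Int))) :=
  (List.range s.length).map (fun r => if r < i then finalRowM s r else initRowM s r)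

lemma filterMap_if_eq_replicate (b : List Int) (a : Int) :
    b.filterMap (fun d2 => if a = d2 then some a else none) = List.replicate (b.count a) a := by
  induction b with
  | nil => simp
  | cons x t ih =>
    by_cases h : a = x
    · subst h; simp [List.filterMap_cons, List.count_cons, ih, List.replicate_succ]
    · simp [List.filterMap_cons, h, List.count_cons, Ne.symm h, ih]

lemma pyCommonItems_some (a b : List Int) :
    pyCommonItems (some a) (some b) = some (commonM a b) := by
  have hred : pyCommonItems (some a) (some b) =
      (if a.length = 0 ∨ b.length = 0 then some []
       else some (a.flatMap fun d1 => b.filterMap fun d2 => if d1 = d2 then some d1 else none)) := rfl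
  rw [hred]
  unfold commonM
  split_ifs with h
  · rcases h with h | h
    · rw [List.length_eq_zero_iff] at h; subst h; simp
    · rw [List.length_eq_zero_iff] at h; subst h
      simp [List.flatMap_def]
  · congr 1
    apply List.flatMap_congr
    intro d1 _
    exact filterMap_if_eq_replicate b d1

lemma getD_map_range' {α : Type} (f : Nat → α) (d : α) {i n : Nat} (hi : i < n) :
    ((List.range n).map f).getD i d = f i := by
  rw [List.getD_eq_getElem _ _ (by simpa using hi)]
  simp

-- a fold of row-local in-place updates over distinct indices, pointwise
lemma foldl_modify_getElem? {ρ : Type} (g : Nat → ρ → ρ) :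
    ∀ (l : List Nat) (m : List ρ), l.Nodup → ∀ (j : Nat),
      (l.foldl (fun m i => m.modify i (g i)) m)[j]? =
        if j ∈ l then (m[j]?).map (g j) else m[j]? := by
  intro l
  induction l with
  | nil => intro m _ j; simp
  | cons a t ih =>
    intro m hnd j
    have hat : a ∉ t := (List.nodup_cons.mp hnd).1
    have hnt : t.Nodup := (List.nodup_cons.mp hnd).2
    simp only [List.foldl_cons]
    rw [ih _ hnt j]
    by_cases hjt : j ∈ t
    · have hja : j ≠ a := fun h => hat (h ▸ hjt)
      have haj : ¬ a = j := fun h => hja h.symm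
      simp [hjt, List.getElem?_modify, haj, List.mem_cons, hja]
    · by_cases hja : j = a
      · subst hja
        simp [hjt, List.getElem?_modify]
      · have haj : ¬ a = j := fun h => hja h.symm
        simp [hjt, List.getElem?_modify, haj, List.mem_cons, hja]

lemma filter_range_eq_single {i n : Nat} (hi : i < n) :
    (List.range n).filter (fun j => decide (i = j)) = [i] := by
  induction n with
  | zero => omega
  | succ n ih =>
    rw [List.range_succ, List.filter_append]
    by_cases h : i = n
    · subst h
      have : (List.range i).filter (fun j => decide (i = j)) = [] := by
        apply List.filter_eq_nil_iff.mpr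
        intro j hj
        simp only [List.mem_range] at hj
        simp; omega
      simp [this]
    · have hin : i < n := by omega
      simp [ih hin, h]

-- ===== pass 1: the diagonal-scratch pass produces outStM s 0 =====

lemma pass1_eq (s : List (List Int)) :
    ((List.range s.length).foldl (fun m i =>
        (List.range s.length).foldl (fun m j =>
          if i = j then msetCell m i j (some (s.getD i [])) else m) m)
      (List.replicate s.length (List.replicate s.length none)))
    = outStM s 0 := by
  set n := s.length with hn
  have hcollapse : ∀ m, ∀ i ∈ List.range n,
      (List.range n).foldl (fun m j =>
        if i = j then msetCell m i j (some (s.getD i [])) else m) m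
      = m.modify i (fun row => row.set i (some (s.getD i []))) := by
    intro m i hi
    simp only [List.mem_range] at hi
    rw [PySem.List.foldl_ite_eq_foldl_filter (p := fun j => i = j)
      (f := fun m j => msetCell m i j (some (s.getD i []))),
      filter_range_eq_single hi]
    rfl
  rw [PySem.List.foldl_congr_mem _ _ _ _ (fun m i hi => hcollapse m i hi)]
  apply List.ext_getElem?
  intro r
  rw [foldl_modify_getElem? _ _ _ List.nodup_range r]
  by_cases hr : r < n
  · simp only [List.mem_range, hr, if_pos, outStM, List.getElem?_map,
      List.getElem?_replicate, List.getElem?_range hr, ← hn]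
    simp only [hr, if_pos, Option.map_some]
    congr 1
    simp only [Nat.not_lt_zero, if_neg, if_false]
    apply List.ext_getElem?
    intro c
    by_cases hc : c < n
    · rw [List.getElem?_set]
      simp only [List.length_replicate, List.getElem?_replicate, hc, if_pos,
        initRowM, List.getElem?_map, List.getElem?_range hc, ← hn]
      by_cases hcr : r = c
      · simp [hcr, hc]
      · have hcr2 : ¬ c = r := fun h => hcr h.symm
        simp [hcr, hcr2]
    · rw [List.getElem?_set]
      simp only [List.length_replicate, List.getElem?_replicate, hc, if_neg, if_false,
        initRowM, List.getElem?_map, ← hn]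
      have : (List.range n)[c]? = none := by
        rw [List.getElem?_eq_none_iff]; simpa using Nat.le_of_not_lt hc
      have hrc : r ≠ c := by omega
      simp [this, hc, hrc]
  · have h1 : (List.replicate n (List.replicate n (none : Option (List Int))))[r]? = none := by
      simp [List.getElem?_replicate, hr]
    simp only [List.mem_range, hr, if_neg, if_false, h1, outStM, List.getElem?_map, ← hn]
    have : (List.range n)[r]? = none := by
      rw [List.getElem?_eq_none_iff]; simpa using Nat.le_of_not_lt hr
    simp [this]

-- ===== pass 2 =====

lemma getD_stMatM (s : List (List Int)) (i j r : Nat) (hr : r < s.length) :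
    (stMatM s i j).getD r [] =
      if r < i then finalRowM s r else if r = i then rowStM s i j else initRowM s r := by
  unfold stMatM
  exact getD_map_range' _ _ hr

lemma step2 (s : List (List Int)) (i j : Nat) (hi : i < s.length) (hj : j < s.length) :
    (if j < i then msetCell (stMatM s i j) i j none
     else msetCell (stMatM s i j) i j
       (pyCommonItems (mgetCell (stMatM s i j) i i) (mgetCell (stMatM s i j) j j)))
    = stMatM s i (j + 1) := by
  set n := s.length with hn
  have hrowi : (stMatM s i j).getD i [] = rowStM s i j := by
    rw [getD_stMatM s i j i hi]; simp
  have hget_ii : mgetCell (stMatM s i j) i i =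
      (if i < j then cellM s i i else some (s.getD i [])) := by
    unfold mgetCell
    rw [hrowi]
    unfold rowStM
    rw [getD_map_range' _ _ hi]
    by_cases h : i < j <;> simp [h]
  have hval : (if j < i then none
      else pyCommonItems (mgetCell (stMatM s i j) i i) (mgetCell (stMatM s i j) j j))
      = cellM s i j := by
    by_cases hji : j < i
    · simp [hji, cellM]
    · by_cases hje : j = i
      · subst hje
        have : mgetCell (stMatM s j j) j j = some (s.getD j []) := by
          rw [hget_ii]; simp
        simp only [hji, if_neg, if_false, this, pyCommonItems_some]
        simp [cellM]
      · have hij : i < j := by omega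
        have h1 : mgetCell (stMatM s i j) i i = cellM s i i := by
          rw [hget_ii]; simp [hij]
        have h2 : mgetCell (stMatM s i j) j j = some (s.getD j []) := by
          unfold mgetCell
          rw [getD_stMatM s i j j hj]
          have hni : ¬ j < i := hji
          simp only [hni, if_neg, if_false, hje, initRowM]
          rw [getD_map_range' _ _ hj]
          simp
        rw [h1, h2]
        have : cellM s i i = some (commonM (s.getD i []) (s.getD i [])) := by
          simp [cellM]
        rw [this, pyCommonItems_some]
        simp [cellM, hji, hje]
  have hrow_set : (rowStM s i j).set j (cellM s i j) = rowStM s i (j + 1) := by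
    apply List.ext_getElem?
    intro c
    by_cases hc : c < n
    · rw [List.getElem?_set]
      unfold rowStM
      simp only [List.length_map, List.length_range, List.getElem?_map,
        List.getElem?_range hc, ← hn, hc, if_pos, Option.map_some]
      by_cases hcj : j = c
      · subst hcj; simp [hj]
      · have : (c < j + 1) = (c < j) := by
          apply propext; constructor <;> intro h <;> omega
        simp [hcj, this]
    · have hcn : (List.range n)[c]? = none := by
        rw [List.getElem?_eq_none_iff]; simpa using Nat.le_of_not_lt hc
      rw [List.getElem?_set]
      unfold rowStM
      have hjc : j ≠ c := by omega
      simp [hcn, hc, ← hn, hjc]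
  have hset : ∀ v, v = cellM s i j →
      msetCell (stMatM s i j) i j v = stMatM s i (j + 1) := by
    intro v hv
    subst hv
    unfold msetCell
    apply List.ext_getElem?
    intro r
    rw [List.getElem?_modify]
    by_cases hr : r < n
    · unfold stMatM
      simp only [List.getElem?_map, List.getElem?_range hr, ← hn, Option.map_some]
      by_cases hri : i = r
      · subst hri
        simp only [if_pos, Nat.lt_irrefl, if_neg, if_false]
        simp [hrow_set]
      · have hir : r ≠ i := fun h => hri h.symm
        simp [hri, hir]
    · have hrn : (List.range n)[r]? = none := by
        rw [List.getElem?_eq_none_iff]; simpa using Nat.le_of_not_lt hr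
      unfold stMatM
      simp [hrn, ← hn]
  by_cases hji : j < i
  · simp only [hji, if_pos]
    apply hset
    simp [cellM, hji]
  · simp only [hji, if_neg, if_false]
    apply hset
    rw [← hval, if_neg hji]

lemma rowStM_zero (s : List (List Int)) (i : Nat) : rowStM s i 0 = initRowM s i := by
  unfold rowStM initRowM
  apply List.map_congr_left
  intro c _
  simp

lemma stMatM_zero (s : List (List Int)) (i : Nat) : stMatM s i 0 = outStM s i := by
  unfold stMatM outStM
  apply List.map_congr_left
  intro r _
  by_cases h : r = i
  · subst h; simp [rowStM_zero, Nat.lt_irrefl]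
  · simp [h]

lemma stMatM_top (s : List (List Int)) (i : Nat) (hi : i < s.length) :
    stMatM s i s.length = outStM s (i + 1) := by
  unfold stMatM outStM
  apply List.map_congr_left
  intro r hr
  simp only [List.mem_range] at hr
  by_cases h1 : r < i
  · simp [h1, Nat.lt_succ_of_lt h1]
  · by_cases h2 : r = i
    · subst h2
      have : rowStM s r s.length = finalRowM s r := by
        unfold rowStM finalRowM
        apply List.map_congr_left
        intro c hc
        simp only [List.mem_range] at hc
        simp [hc]
      simp [h1, this, Nat.lt_succ_self]
    · have : ¬ r < i + 1 := by omega
      simp [h1, h2, this]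

lemma inner2 (s : List (List Int)) (i : Nat) (hi : i < s.length) :
    ∀ (d k : Nat), k + d = s.length →
      (List.range' k d).foldl (fun m j =>
        if j < i then msetCell m i j none
        else msetCell m i j (pyCommonItems (mgetCell m i i) (mgetCell m j j)))
        (stMatM s i k)
      = stMatM s i s.length := by
  intro d
  induction d with
  | zero =>
    intro k hk
    have hks : k = s.length := by omega
    simp [hks]
  | succ d ih =>
    intro k hk
    have hkn : k < s.length := by omega
    rw [List.range'_succ, List.foldl_cons, step2 s i k hi hkn]
    have : k + 1 + d = s.length := by omega
    simpa using ih (k + 1) this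

lemma pass2_step (s : List (List Int)) (i : Nat) (hi : i < s.length) :
    (List.range' 0 s.length).foldl (fun m j =>
        if j < i then msetCell m i j none
        else msetCell m i j (pyCommonItems (mgetCell m i i) (mgetCell m j j)))
      (outStM s i)
    = outStM s (i + 1) := by
  rw [← stMatM_zero s i]
  have h0 : 0 + s.length = s.length := by omega
  rw [inner2 s i hi s.length 0 h0, stMatM_top s i hi]

lemma outer2 (s : List (List Int)) :
    ∀ (d k : Nat), k + d = s.length →
      (List.range' k d).foldl (fun m i =>
        (List.range' 0 s.length).foldl (fun m j =>
          if j < i then msetCell m i j none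
          else msetCell m i j (pyCommonItems (mgetCell m i i) (mgetCell m j j))) m)
        (outStM s k)
      = outStM s s.length := by
  intro d
  induction d with
  | zero =>
    intro k hk
    have hks : k = s.length := by omega
    simp [hks]
  | succ d ih =>
    intro k hk
    have hkn : k < s.length := by omega
    rw [List.range'_succ, List.foldl_cons, pass2_step s k hkn]
    have : k + 1 + d = s.length := by omega
    simpa using ih (k + 1) this

-- A equals the closed form
lemma portA_eq (s : List (List Int)) :
    find_initial_cm_matrix s = (List.range s.length).map (finalRowM s) := by
  unfold find_initial_cm_matrix
  simp only []
  rw [pass1_eq s]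
  have h0 : 0 + s.length = s.length := by omega
  simp only [List.range_eq_range']
  rw [outer2 s s.length 0 h0]
  unfold outStM
  simp only [List.range_eq_range']
  apply List.map_congr_left
  intro r hr
  rw [List.mem_range'_1] at hr
  have hrn : r < s.length := by omega
  simp [hrn]

-- ===== B side =====

lemma commonB_eq (a b : List Int) : commonB a b = commonM a b := by
  unfold commonB commonM
  apply List.flatMap_congr
  intro x _
  exact filterMap_if_eq_replicate b x

lemma finalRowM_cons_zero (h : List Int) (t : List (List Int)) :
    finalRowM (h :: t) 0 =
      some (commonM h h) :: t.map (fun x => some (commonM (commonM h h) x)) := by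
  unfold finalRowM
  rw [List.length_cons, List.range_succ_eq_map, List.map_cons, List.map_map]
  refine congrArg₂ List.cons ?_ ?_
  · simp [cellM]
  · apply List.ext_getElem
    · simp
    · intro c h1 h2
      simp only [List.getElem_map, List.getElem_range, Function.comp_apply]
      have hc : c < t.length := by simpa using h1
      simp [cellM, List.getElem?_eq_getElem hc]

lemma finalRowM_cons_succ (h : List Int) (t : List (List Int)) (i : Nat) :
    finalRowM (h :: t) (i + 1) = none :: finalRowM t i := by
  unfold finalRowM
  rw [List.length_cons, List.range_succ_eq_map, List.map_cons, List.map_map]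
  refine congrArg₂ List.cons ?_ ?_
  · simp [cellM]
  · apply List.map_congr_left
    intro c _
    simp only [Function.comp_apply]
    unfold cellM
    have e1 : (c + 1 < i + 1) = (c < i) := by
      apply propext; constructor <;> intro hx <;> omega
    have e2 : (c + 1 = i + 1) = (c = i) := by
      apply propext; constructor <;> intro hx <;> omega
    simp [e1, e2]

lemma portB_eq (s : List (List Int)) :
    find_initial_cm_matrix_alt s = (List.range s.length).map (finalRowM s) := by
  unfold find_initial_cm_matrix_alt
  induction s with
  | nil => simp [goB]
  | cons h t ih =>
    rw [goB]
    simp only [commonB_eq]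
    rw [List.length_cons, List.range_succ_eq_map, List.map_cons, List.map_map]
    refine congrArg₂ List.cons ?_ ?_
    · rw [finalRowM_cons_zero]
    · rw [ih]
      rw [List.map_map]
      apply List.map_congr_left
      intro i _
      simp only [Function.comp_apply]
      rw [finalRowM_cons_succ]

-- ===== VERDICT (by name: the statement is the Claim_ definition above) =====
theorem find_initial_cm_matrix_spec : Claim_equal_find_initial_cm_matrix := by
  intro s _
  unfold Spec_find_initial_cm_matrix
  rw [portA_eq, portB_eq]
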